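-- pv_equiv track=rewrite | github.com/yifan-CodeDir/TOSEM-RLFDC | automatically-generated-tests/docker/resources/d4j_expr/model/script.py | find_fold
-- ===== SOURCE A (Python) =====
-- def find_fold(project, version):
--   five_fold = {
--     'Lang': [0, 13, 26, 39, 52, 65],
--     'Chart': [0, 5, 10, 16, 21, 26],
--     'Time':  [0, 5, 11, 16, 22, 27],
--     'Math':  [0, 21, 42, 64, 85, 106],
--     'Closure': [0, 27, 53, 80, 106, 133]
--   }
--   for fold in range(1, 6):
--     start_version = five_fold[project][fold-1]
--     end_version = five_fold[project][fold]
--     if (version <= end_version) and (version > start_version):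
--       return fold
-- ===== SOURCE B (Python) =====
-- import bisect
--
-- def find_fold(project, version):
--   five_fold = {
--     'Lang': [0, 13, 26, 39, 52, 65],
--     'Chart': [0, 5, 10, 16, 21, 26],
--     'Time':  [0, 5, 11, 16, 22, 27],
--     'Math':  [0, 21, 42, 64, 85, 106],
--     'Closure': [0, 27, 53, 80, 106, 133]
--   }
--   idx = bisect.bisect_left(five_fold[project], version)
--   if 1 <= idx <= 5:
--     return idx
--   return None
-- ===== Notes on version B (the rewrite author's own statement) =====
-- stated objective: idiomatic
-- what changed: Replaces the linear scan over the five fold intervals by a single bisect_left binary search on the sorted boundary list, returning the index when it lands in 1..5.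
import Mathlib
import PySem

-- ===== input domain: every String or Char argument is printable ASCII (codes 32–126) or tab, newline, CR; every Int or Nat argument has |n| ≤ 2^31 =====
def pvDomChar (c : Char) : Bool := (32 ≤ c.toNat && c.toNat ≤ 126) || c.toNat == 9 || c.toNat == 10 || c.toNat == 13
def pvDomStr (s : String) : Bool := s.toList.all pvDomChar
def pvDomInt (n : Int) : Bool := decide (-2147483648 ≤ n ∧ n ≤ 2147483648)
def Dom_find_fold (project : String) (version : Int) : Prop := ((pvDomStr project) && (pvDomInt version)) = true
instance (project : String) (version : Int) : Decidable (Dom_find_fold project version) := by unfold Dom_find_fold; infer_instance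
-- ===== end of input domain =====

-- B replaces A's linear scan over the five fold intervals by a single bisect_left
-- binary search on the sorted boundary list (idiomatic); projects outside the five
-- dict keys make both Pythons raise KeyError and are excluded by Pre_.


-- ===== PORT A =====
-- the dict literal five_fold (identical text in A and B)
def fiveFold : PySem.Dict String (List Int) :=
  PySem.Dict.ofList
    [("Lang", [0, 13, 26, 39, 52, 65]),
     ("Chart", [0, 5, 10, 16, 21, 26]),
     ("Time", [0, 5, 11, 16, 22, 27]),
     ("Math", [0, 21, 42, 64, 85, 106]),
     ("Closure", [0, 27, 53, 80, 106, 133])]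

-- A's 'for fold in range(1, 6)' loop; pyGet? on the 6-element lists of fiveFold with
-- 0 ≤ fold ≤ 5 never fails, so the 'none' fallback is unreachable under Pre_
def findFoldLoop (bs : List Int) (version : Int) (folds : List Int) : Option Int :=
  match folds with
  | [] => none
  | fold :: rest =>
    match PySem.List.pyGet? bs (fold - 1), PySem.List.pyGet? bs fold with
    | some start_version, some end_version =>
      if version ≤ end_version ∧ version > start_version then some fold
      else findFoldLoop bs version rest
    | _, _ => none

def find_fold (project : String) (version : Int) : Option Int :=
  match PySem.Dict.get? fiveFold project with
  | none => none   -- KeyError in Python; excluded by Pre_find_fold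
  | some bs => findFoldLoop bs version (PySem.List.pyRange 1 6 1)

-- ===== PORT B =====
def find_fold_alt (project : String) (version : Int) : Option Int :=
  match PySem.Dict.get? fiveFold project with
  | none => none   -- KeyError in Python; excluded by Pre_find_fold
  | some bs =>
    let idx : Int := (PySem.List.bisectLeft bs version : Int)
    if 1 ≤ idx ∧ idx ≤ 5 then some idx else none

-- ===== PRECONDITION & SPEC =====
-- Pre_ excludes exactly the project names not among the five dict keys, on which the
-- Python A (and the Python B alike) raises KeyError
def Pre_find_fold (project : String) (version : Int) : Prop :=
  project = "Lang" ∨ project = "Chart" ∨ project = "Time" ∨ project = "Math" ∨ project = "Closure"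
instance (project : String) (version : Int) : Decidable (Pre_find_fold project version) := by
  unfold Pre_find_fold; infer_instance
def pvWitness_find_fold : String × Int := ("Lang", 14)

def Spec_find_fold (project : String) (version : Int) (out : Option Int) : Prop := out = find_fold_alt project version
instance (project : String) (version : Int) (out : Option Int) : Decidable (Spec_find_fold project version out) := by unfold Spec_find_fold; infer_instance

-- ===== CLAIM (what is proved, stated in full; the proofs are below) =====
def Claim_equal_find_fold : Prop := ∀ (project : String) (version : Int), Dom_find_fold project version → Pre_find_fold project version → Spec_find_fold project version (find_fold project version)

-- ===== LEMMAS AND PROOFS =====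

-- bisect_left on a (weakly) sorted list lands exactly past the elements below x
theorem bisectLeft_eq_countP (xs : List Int) (x : Int) (hs : List.Pairwise (· ≤ ·) xs) :
    PySem.List.bisectLeft xs x = xs.countP (fun y => decide (y < x)) := by
  obtain ⟨hle, hlt, hge⟩ := PySem.List.bisectLeft_spec xs x hs
  set k := PySem.List.bisectLeft xs x with hk
  rw [← List.take_append_drop k xs, List.countP_append]
  have h1 : (xs.take k).countP (fun y => decide (y < x)) = k := by
    rw [List.countP_eq_length.mpr, List.length_take, min_eq_left hle]
    intro a ha
    obtain ⟨j, hj, rfl⟩ := List.mem_iff_getElem.mp ha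
    simp only [List.length_take, lt_min_iff] at hj
    rw [List.getElem_take]
    simpa using hlt j hj.2 hj.1
  have h2 : (xs.drop k).countP (fun y => decide (y < x)) = 0 := by
    rw [List.countP_eq_zero]
    intro a ha
    obtain ⟨j, hj, rfl⟩ := List.mem_iff_getElem.mp ha
    rw [List.getElem_drop]
    have := hge (k + j) (by simp at hj; omega) (by omega)
    simpa using not_lt.mpr this
  omega

theorem bisect_closed_Lang (v : Int) :
    (PySem.List.bisectLeft ([0, 13, 26, 39, 52, 65] : List Int) v : Int) = if v ≤ 0 then 0 else if v ≤ 13 then 1 else if v ≤ 26 then 2 else if v ≤ 39 then 3 else if v ≤ 52 then 4 else if v ≤ 65 then 5 else 6 := by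
  rw [bisectLeft_eq_countP _ v (by decide)]
  simp only [List.countP_cons, List.countP_nil, decide_eq_true_eq, lt_iff_not_ge]
  push_cast
  split_ifs <;> omega

set_option maxHeartbeats 2000000 in
theorem per_list_Lang (v : Int) :
    findFoldLoop [0, 13, 26, 39, 52, 65] v [1, 2, 3, 4, 5]
      = (if 1 ≤ ((PySem.List.bisectLeft ([0, 13, 26, 39, 52, 65] : List Int) v : Int)) ∧ ((PySem.List.bisectLeft ([0, 13, 26, 39, 52, 65] : List Int) v : Int)) ≤ 5
         then some ((PySem.List.bisectLeft ([0, 13, 26, 39, 52, 65] : List Int) v : Int)) else none) := by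
  rw [bisect_closed_Lang]
  simp only [findFoldLoop, PySem.List.pyGet?, PySem.List.pyIdx?]
  norm_num
  split_ifs <;> simp_all <;> omega

theorem bisect_closed_Chart (v : Int) :
    (PySem.List.bisectLeft ([0, 5, 10, 16, 21, 26] : List Int) v : Int) = if v ≤ 0 then 0 else if v ≤ 5 then 1 else if v ≤ 10 then 2 else if v ≤ 16 then 3 else if v ≤ 21 then 4 else if v ≤ 26 then 5 else 6 := by
  rw [bisectLeft_eq_countP _ v (by decide)]
  simp only [List.countP_cons, List.countP_nil, decide_eq_true_eq, lt_iff_not_ge]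
  push_cast
  split_ifs <;> omega

set_option maxHeartbeats 2000000 in
theorem per_list_Chart (v : Int) :
    findFoldLoop [0, 5, 10, 16, 21, 26] v [1, 2, 3, 4, 5]
      = (if 1 ≤ ((PySem.List.bisectLeft ([0, 5, 10, 16, 21, 26] : List Int) v : Int)) ∧ ((PySem.List.bisectLeft ([0, 5, 10, 16, 21, 26] : List Int) v : Int)) ≤ 5
         then some ((PySem.List.bisectLeft ([0, 5, 10, 16, 21, 26] : List Int) v : Int)) else none) := by
  rw [bisect_closed_Chart]
  simp only [findFoldLoop, PySem.List.pyGet?, PySem.List.pyIdx?]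
  norm_num
  split_ifs <;> simp_all <;> omega

theorem bisect_closed_Time (v : Int) :
    (PySem.List.bisectLeft ([0, 5, 11, 16, 22, 27] : List Int) v : Int) = if v ≤ 0 then 0 else if v ≤ 5 then 1 else if v ≤ 11 then 2 else if v ≤ 16 then 3 else if v ≤ 22 then 4 else if v ≤ 27 then 5 else 6 := by
  rw [bisectLeft_eq_countP _ v (by decide)]
  simp only [List.countP_cons, List.countP_nil, decide_eq_true_eq, lt_iff_not_ge]
  push_cast
  split_ifs <;> omega

set_option maxHeartbeats 2000000 in
theorem per_list_Time (v : Int) :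
    findFoldLoop [0, 5, 11, 16, 22, 27] v [1, 2, 3, 4, 5]
      = (if 1 ≤ ((PySem.List.bisectLeft ([0, 5, 11, 16, 22, 27] : List Int) v : Int)) ∧ ((PySem.List.bisectLeft ([0, 5, 11, 16, 22, 27] : List Int) v : Int)) ≤ 5
         then some ((PySem.List.bisectLeft ([0, 5, 11, 16, 22, 27] : List Int) v : Int)) else none) := by
  rw [bisect_closed_Time]
  simp only [findFoldLoop, PySem.List.pyGet?, PySem.List.pyIdx?]
  norm_num
  split_ifs <;> simp_all <;> omega

theorem bisect_closed_Math (v : Int) :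
    (PySem.List.bisectLeft ([0, 21, 42, 64, 85, 106] : List Int) v : Int) = if v ≤ 0 then 0 else if v ≤ 21 then 1 else if v ≤ 42 then 2 else if v ≤ 64 then 3 else if v ≤ 85 then 4 else if v ≤ 106 then 5 else 6 := by
  rw [bisectLeft_eq_countP _ v (by decide)]
  simp only [List.countP_cons, List.countP_nil, decide_eq_true_eq, lt_iff_not_ge]
  push_cast
  split_ifs <;> omega

set_option maxHeartbeats 2000000 in
theorem per_list_Math (v : Int) :
    findFoldLoop [0, 21, 42, 64, 85, 106] v [1, 2, 3, 4, 5]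
      = (if 1 ≤ ((PySem.List.bisectLeft ([0, 21, 42, 64, 85, 106] : List Int) v : Int)) ∧ ((PySem.List.bisectLeft ([0, 21, 42, 64, 85, 106] : List Int) v : Int)) ≤ 5
         then some ((PySem.List.bisectLeft ([0, 21, 42, 64, 85, 106] : List Int) v : Int)) else none) := by
  rw [bisect_closed_Math]
  simp only [findFoldLoop, PySem.List.pyGet?, PySem.List.pyIdx?]
  norm_num
  split_ifs <;> simp_all <;> omega

theorem bisect_closed_Closure (v : Int) :
    (PySem.List.bisectLeft ([0, 27, 53, 80, 106, 133] : List Int) v : Int) = if v ≤ 0 then 0 else if v ≤ 27 then 1 else if v ≤ 53 then 2 else if v ≤ 80 then 3 else if v ≤ 106 then 4 else if v ≤ 133 then 5 else 6 := by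
  rw [bisectLeft_eq_countP _ v (by decide)]
  simp only [List.countP_cons, List.countP_nil, decide_eq_true_eq, lt_iff_not_ge]
  push_cast
  split_ifs <;> omega

set_option maxHeartbeats 2000000 in
theorem per_list_Closure (v : Int) :
    findFoldLoop [0, 27, 53, 80, 106, 133] v [1, 2, 3, 4, 5]
      = (if 1 ≤ ((PySem.List.bisectLeft ([0, 27, 53, 80, 106, 133] : List Int) v : Int)) ∧ ((PySem.List.bisectLeft ([0, 27, 53, 80, 106, 133] : List Int) v : Int)) ≤ 5
         then some ((PySem.List.bisectLeft ([0, 27, 53, 80, 106, 133] : List Int) v : Int)) else none) := by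
  rw [bisect_closed_Closure]
  simp only [findFoldLoop, PySem.List.pyGet?, PySem.List.pyIdx?]
  norm_num
  split_ifs <;> simp_all <;> omega

-- ===== VERDICT (by name: the statement is the Claim_ definition above) =====
theorem find_fold_spec : Claim_equal_find_fold := by
  intro project version _ hpre
  unfold Spec_find_fold find_fold find_fold_alt
  have hr : PySem.List.pyRange 1 6 1 = [1, 2, 3, 4, 5] := by decide
  rcases hpre with h | h | h | h | h <;> subst h
  · rw [show PySem.Dict.get? fiveFold "Lang" = some [0, 13, 26, 39, 52, 65] from by decide, hr]
    exact per_list_Lang version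
  · rw [show PySem.Dict.get? fiveFold "Chart" = some [0, 5, 10, 16, 21, 26] from by decide, hr]
    exact per_list_Chart version
  · rw [show PySem.Dict.get? fiveFold "Time" = some [0, 5, 11, 16, 22, 27] from by decide, hr]
    exact per_list_Time version
  · rw [show PySem.Dict.get? fiveFold "Math" = some [0, 21, 42, 64, 85, 106] from by decide, hr]
    exact per_list_Math version
  · rw [show PySem.Dict.get? fiveFold "Closure" = some [0, 27, 53, 80, 106, 133] from by decide, hr]
    exact per_list_Closure version
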